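-- pv_equiv track=rewrite | github.com/jnsp/learn-to-code-by-solving-problems | ch08/zigzag.py | answered_words
-- ===== SOURCE A (Python) =====
-- from collections import defaultdict
-- from itertools import cycle
--
-- def answered_words(words: list[str], asked: str) -> list[str]:
--     dictionary = defaultdict(list)
--     for word in words:
--         first_letter = word[0]
--         dictionary[first_letter].append(word)
--
--     cyclers = {}
--     for first_letter, words in dictionary.items():
--         cyclers[first_letter] = cycle(sorted(words))
--
--     return [next(cyclers[first_letter]) for first_letter in asked]
-- ===== SOURCE B (Python) =====
-- def answered_words(words: list[str], asked: str) -> list[str]: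
--     ws = sorted(words)
--     bounds = {}
--     for ch in asked:
--         if ch not in bounds:
--             lo = sum(1 for w in ws if not w or w[0] < ch)
--             size = sum(1 for w in ws if w and w[0] == ch)
--             bounds[ch] = (lo, size)
--     seen = {}
--     result = []
--     for ch in asked:
--         lo, size = bounds[ch]
--         k = seen.get(ch, 0)
--         result.append(ws[lo + k % size])
--         seen[ch] = k + 1
--     return result
-- ===== Notes on version B (the rewrite author's own statement) =====
-- stated objective: alternative
-- what changed: Drops A's per-letter lists and cycle iterators entirely: B sorts words once into one flat array and, per letter, computes the contiguous block of that letter by counting order statistics (rank = #words below the letter, size = #words starting with it), then answers asked by direct indexing ws[lo + seen%size] with a seen-counter dict.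
import Mathlib
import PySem

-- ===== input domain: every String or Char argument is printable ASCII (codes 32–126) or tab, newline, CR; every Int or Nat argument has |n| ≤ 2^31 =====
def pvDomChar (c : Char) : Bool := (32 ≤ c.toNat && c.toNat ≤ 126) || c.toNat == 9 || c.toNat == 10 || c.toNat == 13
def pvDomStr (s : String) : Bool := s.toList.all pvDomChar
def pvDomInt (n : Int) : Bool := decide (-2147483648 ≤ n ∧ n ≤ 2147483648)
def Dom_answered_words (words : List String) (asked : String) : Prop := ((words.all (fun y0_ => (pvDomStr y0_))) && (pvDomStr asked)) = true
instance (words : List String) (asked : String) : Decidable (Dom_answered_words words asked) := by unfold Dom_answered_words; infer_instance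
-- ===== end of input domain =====

-- B keeps no per-letter lists and no cycle iterators at all: it sorts words into ONE flat
-- array and, per letter, finds that letter's contiguous block by counting order statistics
-- (rank = #words sorting below the letter, size = #words starting with it), answering each
-- character by direct indexing ws[lo + seen % size] (alternative algorithm, not claimed faster).

-- ===== PORT A =====
-- itertools.cycle(sorted(group)) is modeled as the sorted group plus a per-letter counter k
-- in the comprehension loop: next(cycler) = group[k % len(group)], k incremented per use.
-- word[0] on an empty word (IndexError) and a letter of asked absent from the groups
-- (KeyError) are excluded by Pre_; the ports use placeholder defaults there.
def answered_words (words : List String) (asked : String) : List String :=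
  let dictionary : PySem.Dict Char (List String) :=
    words.foldl (fun d word =>
      d.modify ((PySem.Str.pyGet? word 0).getD ' ') [] (fun g => g ++ [word])) PySem.Dict.empty
  let cyclers : PySem.Dict Char (List String) :=
    dictionary.items.foldl (fun cy p => cy.insert p.1 (PySem.List.sorted p.2 (fun x => x) false))
      PySem.Dict.empty
  (asked.toList.foldl (fun (st : List String × PySem.Dict Char Nat) ch =>
      let g := (cyclers.get? ch).getD []
      let k := st.2.getD ch 0
      (st.1 ++ [(g[k % g.length]?).getD ""], st.2.insert ch (k + 1)))
    ([], PySem.Dict.empty)).1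

-- ===== PORT B =====
-- `not w or w[0] < ch` : empty words sort below any 1-char string, else first-char comparison
def pvLtP (ch : Char) (w : String) : Bool :=
  match w.toList with | [] => true | c :: _ => decide (c < ch)
-- `w and w[0] == ch`
def pvEqP (ch : Char) (w : String) : Bool :=
  match w.toList with | [] => false | c :: _ => c == ch
-- sum(1 for w in ws if cond) is List.countP; ws[lo + k % size] uses getElem? with default ""
-- (in range under Pre_; size = 0, Python's ZeroDivisionError, is excluded by Pre_ as well).
def answered_words_alt (words : List String) (asked : String) : List String :=
  let ws := PySem.List.sorted words (fun x => x) false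
  let bounds : PySem.Dict Char (Nat × Nat) :=
    asked.toList.foldl (fun d ch =>
      if d.contains ch then d
      else d.insert ch (ws.countP (pvLtP ch), ws.countP (pvEqP ch))) PySem.Dict.empty
  (asked.toList.foldl (fun (st : List String × PySem.Dict Char Nat) ch =>
      let p := (bounds.get? ch).getD (0, 0)
      let k := st.2.getD ch 0
      (st.1 ++ [(ws[p.1 + k % p.2]?).getD ""], st.2.insert ch (k + 1)))
    ([], PySem.Dict.empty)).1

-- ===== PRECONDITION & SPEC =====
-- Exactly the inputs where Python A returns: every word is nonempty (else word[0] raises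
-- IndexError) and every character of asked is the first letter of some word (else KeyError).
def Pre_answered_words (words : List String) (asked : String) : Prop :=
  (words.all (fun w => !(w == ""))
    && asked.toList.all (fun ch => words.any (fun w => PySem.Str.pyGet? w 0 == some ch))) = true
instance (words : List String) (asked : String) : Decidable (Pre_answered_words words asked) := by
  unfold Pre_answered_words; infer_instance
def pvWitness_answered_words : List String × String := (["banana", "apple", "art"], "aba")

def Spec_answered_words (words : List String) (asked : String) (out : List String) : Prop :=
  out = answered_words_alt words asked
instance (words : List String) (asked : String) (out : List String) : Decidable (Spec_answered_words words asked out) := by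
  unfold Spec_answered_words; infer_instance

-- ===== CLAIM (what is proved, stated in full; the proofs are below) =====
def Claim_equal_answered_words : Prop := ∀ (words : List String) (asked : String), Dom_answered_words words asked → Pre_answered_words words asked → Spec_answered_words words asked (answered_words words asked)

-- ===== LEMMAS AND PROOFS =====

-- first letter of a word (placeholder ' ' unreachable under Pre_)
def pvFirst (w : String) : Char := (PySem.Str.pyGet? w 0).getD ' '

-- the sorted group of words starting with c — the common reference value of both ports
def pvGrp (words : List String) (c : Char) : List String :=
  PySem.List.sorted (words.filter (fun w => pvFirst w == c)) (fun x => x) false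

-- reference result: position by position, group of the letter indexed by prefix count mod size
def pvRef (G : Char → List String) : List Char → List Char → List String
  | _, [] => []
  | pre, ch :: rest =>
      (let g := G ch; (g[pre.count ch % g.length]?).getD "") :: pvRef G (pre ++ [ch]) rest

-- A's defaultdict grouping loop
lemma pv_group_getD (l : List String) (c : Char) :
    (l.foldl (fun d w =>
      d.modify ((PySem.Str.pyGet? w 0).getD ' ') [] (fun g => g ++ [w])) PySem.Dict.empty).getD c []
    = l.filter (fun w => pvFirst w == c) := by
  have h := PySem.Dict.getD_foldl_modify_append (l := l.map (fun w => (pvFirst w, w)))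
    (d := PySem.Dict.empty) (c := c)
  rw [List.foldl_map] at h
  simp only [pvFirst] at h ⊢
  rw [h, List.filter_map]
  simp [Function.comp_def, List.map_map]

-- the sublist of the globally sorted words starting with c IS the sorted group
lemma pvFilterSorted (words : List String) (c : Char) :
    (PySem.List.sorted words (fun x => x) false).filter (fun w => pvFirst w == c)
    = pvGrp words c := by
  refine (PySem.List.sorted_id_eq_of_perm_of_pairwise _ _ ?_ ?_).symm
  · exact (PySem.List.sorted_perm words (fun x => x) false).filter _
  · exact (PySem.List.sorted_pairwise words (fun x => x)).filter _

-- A's cyclers dict looks up to the sorted group (empty list where Python would KeyError)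
lemma pvGA (words : List String) (c : Char) :
    (((words.foldl (fun d word =>
        d.modify ((PySem.Str.pyGet? word 0).getD ' ') [] (fun g => g ++ [word])) PySem.Dict.empty).items.foldl
        (fun cy p => cy.insert p.1 (PySem.List.sorted p.2 (fun x => x) false)) PySem.Dict.empty).get? c).getD []
    = pvGrp words c := by
  set D := words.foldl (fun d word =>
      d.modify ((PySem.Str.pyGet? word 0).getD ' ') [] (fun g => g ++ [word])) PySem.Dict.empty with hD
  have hnd : D.keys.Nodup := by
    rw [hD]
    exact PySem.Dict.nodup_keys_foldl_modify_key _ _ _ _ _ PySem.Dict.nodup_keys_empty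
  have hDgetD : D.getD c [] = words.filter (fun w => pvFirst w == c) := by
    rw [hD]; exact pv_group_getD words c
  set C := D.items.foldl (fun cy p => cy.insert p.1 (PySem.List.sorted p.2 (fun x => x) false))
      PySem.Dict.empty with hC
  have hitems : C.items = D.items.map (fun p => (p.1, PySem.List.sorted p.2 (fun x => x) false)) := by
    rw [hC]
    have := PySem.Dict.items_foldl_insert_fresh (l := D.items) (k := fun p => p.1)
      (v := fun p => PySem.List.sorted p.2 (fun x => x) false) (d := PySem.Dict.empty)
      (fun a _ => PySem.Dict.contains_empty _) hnd
    simpa using this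
  have hkeys : C.keys = D.keys := by
    simp only [PySem.Dict.keys, hitems, List.map_map]
    rfl
  cases hg : D.get? c with
  | none =>
    have hnc : C.get? c = none := by
      rw [PySem.Dict.get?_eq_none_iff_not_mem_keys, hkeys]
      rw [PySem.Dict.get?_eq_none_iff_not_mem_keys] at hg
      exact hg
    have hfil : words.filter (fun w => pvFirst w == c) = [] := by
      rw [← hDgetD]
      have : D.contains c = false := by
        rw [PySem.Dict.get?_eq_none_iff_contains] at hg
        exact hg
      exact PySem.Dict.getD_of_not_contains D _ this
    rw [hnc]
    rw [pvGrp, hfil]; simp [(PySem.List.sorted_eq_nil_iff ([]:List String) _ false).2 rfl]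
  | some v =>
    have hv : v = words.filter (fun w => pvFirst w == c) := by
      rw [← hDgetD]
      exact (PySem.Dict.getD_of_get?_eq_some D _ hg).symm
    have hm : (c, PySem.List.sorted v (fun x => x) false) ∈ C.items := by
      rw [hitems]
      exact List.mem_map.2 ⟨(c, v), PySem.Dict.mem_items_of_get?_eq_some D hg, rfl⟩
    have hcnd : C.keys.Nodup := by rw [hkeys]; exact hnd
    rw [PySem.Dict.get?_of_mem_items C hm hcnd]
    simp [pvGrp, hv]

-- A's comprehension loop: the counter dict realises prefix counts
lemma pvAloop (G : Char → List String) (l pre : List Char) (acc : List String)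
    (cnt : PySem.Dict Char Nat) (h : ∀ c, cnt.getD c 0 = pre.count c) :
    (l.foldl (fun (st : List String × PySem.Dict Char Nat) ch =>
      let g := G ch
      let k := st.2.getD ch 0
      (st.1 ++ [(g[k % g.length]?).getD ""], st.2.insert ch (k + 1))) (acc, cnt)).1
    = acc ++ pvRef G pre l := by
  induction l generalizing pre acc cnt with
  | nil => simp [pvRef]
  | cons ch rest ih =>
    simp only [List.foldl_cons, pvRef]
    rw [ih (pre := pre ++ [ch])]
    · rw [h ch]; simp
    · intro c
      rw [PySem.Dict.getD_insert]
      by_cases hc : c = ch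
      · subst hc; simp [h c, List.count_append]
      · simp [hc, h c, List.count_append, Ne.symm hc]

-- ===== B-side machinery: order-statistics facts about the one sorted array =====

lemma pvEqP_eq_first (c : Char) (w : String) (hw : w ≠ "") :
    pvEqP c w = (pvFirst w == c) := by
  have hne : w.toList ≠ [] := fun h => hw (String.toList_eq_nil_iff.mp h)
  cases hl : w.toList with
  | nil => exact absurd hl hne
  | cons a r =>
    simp [pvEqP, pvFirst, hl, PySem.Str.pyGet?]

lemma pvEqP_of_pyGet? (c : Char) (w : String) (h : PySem.Str.pyGet? w 0 = some c) :
    pvEqP c w = true := by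
  cases hl : w.toList with
  | nil =>
    simp [PySem.Str.pyGet?, PySem.Chars.pyGet?, PySem.List.pyGet?, PySem.List.pyIdx?, hl] at h
  | cons a r =>
    simp [PySem.Str.pyGet?, PySem.Chars.pyGet?, PySem.List.pyGet?, PySem.List.pyIdx?, hl] at h
    simp [pvEqP, hl, h]

-- pvLtP and pvEqP are disjoint
lemma pvLt_not_eq (c : Char) (w : String) (h : pvLtP c w = true) : pvEqP c w = false := by
  cases hl : w.toList with
  | nil => simp [pvEqP, hl]
  | cons a r =>
    rw [pvLtP, hl] at h
    simp at h
    simp [pvEqP, hl]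
    exact ne_of_lt h

-- a word in c's group is strictly above any word below c
lemma pvLt_lt_of_eq (c : Char) (x h : String) (hx : pvLtP c x = true) (hh : pvEqP c h = true) :
    x < h := by
  rw [String.lt_iff_toList_lt]
  cases hhl : h.toList with
  | nil => rw [pvEqP, hhl] at hh; simp at hh
  | cons b r =>
    rw [pvEqP, hhl] at hh
    simp at hh
    cases hxl : x.toList with
    | nil => exact List.Lex.nil
    | cons a s =>
      rw [pvLtP, hxl] at hx
      simp at hx
      exact List.Lex.rel (hh ▸ hx)

-- a word neither below c nor in c's group is strictly above any word of c's group
lemma pvEq_lt_of_gt (c : Char) (x h : String) (hlt : pvLtP c h = false) (heq : pvEqP c h = false)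
    (hx : pvEqP c x = true) : x < h := by
  rw [String.lt_iff_toList_lt]
  cases hhl : h.toList with
  | nil => rw [pvLtP, hhl] at hlt; simp at hlt
  | cons b r =>
    rw [pvLtP, hhl] at hlt
    rw [pvEqP, hhl] at heq
    simp at hlt heq
    cases hxl : x.toList with
    | nil => rw [pvEqP, hxl] at hx; simp at hx
    | cons a s =>
      rw [pvEqP, hxl] at hx
      simp at hx
      exact List.Lex.rel (by rw [hx]; exact lt_of_le_of_ne hlt (Ne.symm heq))

-- CONTIGUITY: in a sorted list, the words of c's group sit in one block starting at the
-- rank of c (= the count of words below c), in group order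
lemma pvContig (c : Char) (l : List String) (hp : l.Pairwise (· ≤ ·)) :
    ∀ m, m < (l.filter (pvEqP c)).length →
      l[(l.countP (pvLtP c)) + m]? = (l.filter (pvEqP c))[m]? := by
  induction l with
  | nil => intro m hm; simp at hm
  | cons h t ih =>
    rw [List.pairwise_cons] at hp
    obtain ⟨hle, hpt⟩ := hp
    intro m hm
    by_cases hlt : pvLtP c h = true
    · have heq : pvEqP c h = false := pvLt_not_eq c h hlt
      rw [List.filter_cons_of_neg (by simp [heq])] at hm ⊢
      rw [List.countP_cons_of_pos hlt,
        show t.countP (pvLtP c) + 1 + m = (t.countP (pvLtP c) + m) + 1 by omega,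
        List.getElem?_cons_succ]
      exact ih hpt m hm
    · by_cases heq : pvEqP c h = true
      · have h0 : t.countP (pvLtP c) = 0 := by
          rw [List.countP_eq_zero]
          intro x hx hlx
          exact absurd (hle x hx) (not_le_of_gt (pvLt_lt_of_eq c x h hlx heq))
        rw [List.countP_cons_of_neg (by simpa using hlt), h0]
        rw [List.filter_cons_of_pos heq] at hm ⊢
        cases m with
        | zero => simp
        | succ m' =>
          simp only [Nat.zero_add, List.getElem?_cons_succ]
          have := ih hpt m' (by simp only [List.length_cons] at hm; omega)
          rw [h0] at this
          simpa using this
      · exfalso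
        have hnil : (h :: t).filter (pvEqP c) = [] := by
          rw [List.filter_eq_nil_iff]
          intro x hx
          rcases List.mem_cons.1 hx with rfl | hxt
          · simp [heq]
          · intro hxe
            exact absurd (hle x hxt)
              (not_le_of_gt (pvEq_lt_of_gt c x h (Bool.not_eq_true _ ▸ hlt) (by simpa using heq) (by simpa using hxe)))
        rw [hnil] at hm
        simp at hm

-- the bounds-memo loop: after the first pass, every letter of asked maps to its (rank, size)
lemma pvBounds (ws : List String) (l : List Char) (d : PySem.Dict Char (Nat × Nat))
    (hd : ∀ c, d.contains c = true → d.get? c = some (ws.countP (pvLtP c), ws.countP (pvEqP c))) :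
    ∀ c, (c ∈ l ∨ d.contains c = true) →
      (l.foldl (fun d ch =>
        if d.contains ch then d
        else d.insert ch (ws.countP (pvLtP ch), ws.countP (pvEqP ch))) d).get? c
      = some (ws.countP (pvLtP c), ws.countP (pvEqP c)) := by
  induction l generalizing d with
  | nil =>
    intro c hc
    rcases hc with hc | hc
    · simp at hc
    · exact hd c hc
  | cons ch t ih =>
    intro c hc
    rw [List.foldl_cons]
    by_cases hcontains : d.contains ch = true
    · rw [if_pos hcontains]
      refine ih d hd c ?_
      rcases hc with hc | hc
      · rcases List.mem_cons.1 hc with rfl | hct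
        · exact Or.inr hcontains
        · exact Or.inl hct
      · exact Or.inr hc
    · rw [if_neg hcontains]
      refine ih _ ?_ c ?_
      · intro c' hc'
        rw [PySem.Dict.contains_insert] at hc'
        by_cases hcc : c' = ch
        · subst hcc
          rw [PySem.Dict.get?_insert_self]
        · rw [PySem.Dict.get?_insert_of_ne _ _ hcc]
          refine hd c' ?_
          simpa [hcc] using hc'
      · rcases hc with hc | hc
        · rcases List.mem_cons.1 hc with rfl | hct
          · exact Or.inr (PySem.Dict.contains_insert_self _ _ _)
          · exact Or.inl hct
        · exact Or.inr (by rw [PySem.Dict.contains_insert, hc]; simp)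
-- B's answering loop: direct indexing into the sorted array realises the reference result
lemma pvBloop (ws : List String) (hws : ws.Pairwise (· ≤ ·))
    (bounds : PySem.Dict Char (Nat × Nat)) (l pre : List Char) (acc : List String)
    (cnt : PySem.Dict Char Nat) (hcnt : ∀ c, cnt.getD c 0 = pre.count c)
    (hb : ∀ c ∈ l, bounds.get? c = some (ws.countP (pvLtP c), ws.countP (pvEqP c)))
    (hpos : ∀ c ∈ l, 0 < ws.countP (pvEqP c)) :
    (l.foldl (fun (st : List String × PySem.Dict Char Nat) ch =>
      let p := (bounds.get? ch).getD (0, 0)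
      let k := st.2.getD ch 0
      (st.1 ++ [(ws[p.1 + k % p.2]?).getD ""], st.2.insert ch (k + 1))) (acc, cnt)).1
    = acc ++ pvRef (fun c => ws.filter (pvEqP c)) pre l := by
  induction l generalizing pre acc cnt with
  | nil => simp [pvRef]
  | cons ch rest ih =>
    simp only [List.foldl_cons, pvRef]
    rw [hb ch List.mem_cons_self]
    have hsize : ws.countP (pvEqP ch) = (ws.filter (pvEqP ch)).length :=
      List.countP_eq_length_filter
    have hmod : (cnt.getD ch 0) % ws.countP (pvEqP ch) < (ws.filter (pvEqP ch)).length := by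
      rw [← hsize]
      exact Nat.mod_lt _ (hpos ch List.mem_cons_self)
    have hidx := pvContig ch ws hws _ hmod
    simp only [Option.getD_some, hcnt ch, hsize]
    rw [ih (pre := pre ++ [ch])]
    · rw [hcnt ch, hsize] at hidx
      rw [hidx]
      simp
    · intro c
      rw [PySem.Dict.getD_insert]
      by_cases hc : c = ch
      · subst hc; simp [List.count_append]
      · simp [hc, hcnt c, Ne.symm hc]
    · intro c hc; exact hb c (List.mem_cons_of_mem _ hc)
    · intro c hc; exact hpos c (List.mem_cons_of_mem _ hc)

lemma pvRefCongr (G G' : Char → List String) (pre l : List Char)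
    (h : ∀ c ∈ l, G c = G' c) : pvRef G pre l = pvRef G' pre l := by
  induction l generalizing pre with
  | nil => rfl
  | cons ch rest ih =>
    simp only [pvRef, h ch List.mem_cons_self]
    rw [ih _ (fun c hc => h c (List.mem_cons_of_mem _ hc))]

-- ===== VERDICT (by name: the statement is the Claim_ definition above) =====
theorem answered_words_spec : Claim_equal_answered_words := by
  intro words asked _ hpre
  unfold Spec_answered_words
  unfold Pre_answered_words at hpre
  simp only [Bool.and_eq_true, List.all_eq_true, List.any_eq_true, beq_iff_eq] at hpre
  obtain ⟨hne, hask⟩ := hpre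
  have hA : answered_words words asked
      = [] ++ pvRef (fun ch => (((words.foldl (fun d word =>
          d.modify ((PySem.Str.pyGet? word 0).getD ' ') [] (fun g => g ++ [word])) PySem.Dict.empty).items.foldl
          (fun cy p => cy.insert p.1 (PySem.List.sorted p.2 (fun x => x) false)) PySem.Dict.empty).get? ch).getD [])
        [] asked.toList :=
    pvAloop _ asked.toList [] [] PySem.Dict.empty (fun c => by simp [PySem.Dict.getD_empty])
  have hbounds := pvBounds (PySem.List.sorted words (fun x => x) false) asked.toList
    PySem.Dict.empty (fun c hc => by rw [PySem.Dict.contains_empty] at hc; exact absurd hc (by simp))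
  have hB : answered_words_alt words asked
      = [] ++ pvRef (fun c => (PySem.List.sorted words (fun x => x) false).filter (pvEqP c))
        [] asked.toList := by
    refine pvBloop _ (PySem.List.sorted_pairwise words (fun x => x)) _ asked.toList [] []
      PySem.Dict.empty (fun c => by simp [PySem.Dict.getD_empty]) ?_ ?_
    · intro c hc
      exact hbounds c (Or.inl hc)
    · intro c hc
      obtain ⟨w, hw, hwc⟩ := hask c hc
      rw [List.countP_pos_iff]
      refine ⟨w, ?_, ?_⟩
      · rw [PySem.List.mem_sorted]; exact hw
      · exact pvEqP_of_pyGet? c w (by simpa using hwc)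
  rw [hA, hB, List.nil_append, List.nil_append]
  refine pvRefCongr _ _ _ _ ?_
  intro c _
  rw [pvGA]
  rw [← pvFilterSorted]
  refine List.filter_congr ?_
  intro w hw
  rw [PySem.List.mem_sorted] at hw
  exact (pvEqP_eq_first c w (by simpa using hne w hw)).symm
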